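-- pv_equiv track=rewrite | github.com/Froodooo/aoc20 | day20/day_20.py | _flip_two_tiles
-- ===== SOURCE A (Python) =====
-- def _flip_two_tiles(tile_one, tile_two):
--     tile_one_borders = _get_tile_borders(tile_one)
--     tile_two_borders = _get_tile_borders(tile_two)
--
--     for rotation_1 in range(0, 4):
--         rotated_tile_one_borders = _rotate_borders(
--             tile_one_borders, rotation_1)
--         for flip_1 in ['horizontal', 'vertical', 'none']:
--             flipped_tile_one_borders = _flip_borders(
--                 rotated_tile_one_borders, flip_1)
--             for rotation_2 in range(0, 4):
--                 rotated_tile_two_borders = _rotate_borders(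
--                     tile_two_borders, rotation_2)
--                 for flip_2 in ['horizontal', 'vertical', 'none']:
--                     flipped_tile_two_borders = _flip_borders(
--                         rotated_tile_two_borders, flip_2)
--
--                     if flipped_tile_one_borders[1] == flipped_tile_two_borders[3]:
--                         return (rotation_1, flip_1, rotation_2, flip_2)
--
-- def _rotate_borders(borders, times):
--     if times == 0:
--         return borders
--     return borders[-times:] + borders[:-times]
--
-- def _flip_borders(borders, orientation):
--     [top, right, bottom, left] = borders
--     if orientation == 'horizontal':
--         return [top[::-1], left, bottom[::-1], right]
--     elif orientation == 'vertical':
--         return [bottom, right[::-1], top, left[::-1]]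
--     else:
--         return borders
--
-- def _get_tile_borders(tile):
--     top = ''.join([pixel for pixel in tile[0]])
--     bottom = ''.join([pixel for pixel in tile[len(tile) - 1]])
--     left = ''.join([tile[row][0] for row in range(len(tile))])
--     right = ''.join([tile[row][len(tile) - 1] for row in range(len(tile))])
--
--     return [top, right, bottom, left]
-- ===== SOURCE B (Python) =====
-- def _flip_two_tiles(tile_one, tile_two):
--     borders_one = _borders(tile_one)
--     borders_two = _borders(tile_two)
--
--     # index: left border value of each of tile_two's 12 orientations -> first (rotation_2, flip_2)
--     index = {}
--     for rotation_2 in range(4):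
--         for flip_2 in ('horizontal', 'vertical', 'none'):
--             index.setdefault(_left_border(borders_two, rotation_2, flip_2),
--                              (rotation_2, flip_2))
--
--     for rotation_1 in range(4):
--         for flip_1 in ('horizontal', 'vertical', 'none'):
--             hit = index.get(_right_border(borders_one, rotation_1, flip_1))
--             if hit is not None:
--                 return (rotation_1, flip_1) + hit
--     return None
--
--
-- def _borders(tile):
--     n = len(tile)
--     top = ''.join(tile[0])
--     bottom = ''.join(tile[n - 1])
--     left = ''.join(row[0] for row in tile)
--     right = ''.join(row[n - 1] for row in tile)
--     return [top, right, bottom, left]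
--
--
-- def _left_border(borders, rotation, flip):
--     # index 3 of the flipped, rotated border list, computed directly
--     if flip == 'horizontal':
--         return borders[(1 - rotation) % 4]
--     if flip == 'vertical':
--         return borders[(3 - rotation) % 4][::-1]
--     return borders[(3 - rotation) % 4]
--
--
-- def _right_border(borders, rotation, flip):
--     # index 1 of the flipped, rotated border list, computed directly
--     if flip == 'horizontal':
--         return borders[(3 - rotation) % 4]
--     if flip == 'vertical':
--         return borders[(1 - rotation) % 4][::-1]
--     return borders[(1 - rotation) % 4]
-- ===== Notes on version B (the rewrite author's own statement) =====
-- stated objective: alternative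
-- what changed: B precomputes a dict mapping each of tile_two's 12 orientation left-border values to its first (rotation_2, flip_2), then makes a single pass over tile_one's 12 orientations with a lookup, computing only the one border string each side needs instead of rebuilding and scanning whole border lists in a nested double loop.
import Mathlib
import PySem

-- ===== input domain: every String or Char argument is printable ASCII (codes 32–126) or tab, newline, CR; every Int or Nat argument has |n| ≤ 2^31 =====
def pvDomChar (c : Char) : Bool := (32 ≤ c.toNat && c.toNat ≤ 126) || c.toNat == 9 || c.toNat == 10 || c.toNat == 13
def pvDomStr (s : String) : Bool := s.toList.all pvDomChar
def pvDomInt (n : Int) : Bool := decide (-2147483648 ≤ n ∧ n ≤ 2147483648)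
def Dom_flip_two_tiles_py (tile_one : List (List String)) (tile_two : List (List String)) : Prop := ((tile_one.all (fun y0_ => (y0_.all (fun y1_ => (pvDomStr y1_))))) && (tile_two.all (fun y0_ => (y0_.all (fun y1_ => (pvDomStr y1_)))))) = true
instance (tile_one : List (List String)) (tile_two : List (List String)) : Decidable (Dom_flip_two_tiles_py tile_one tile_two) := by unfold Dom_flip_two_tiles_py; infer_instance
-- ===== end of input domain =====

-- B replaces A's inner double scan of tile_two's 12 orientations by a dict built once
-- (first (rotation_2, flip_2) per left-border value) and a single lookup per tile_one orientation,
-- computing each needed border string directly instead of rebuilding whole border lists.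

-- s[::-1]
def pyRevStr (s : String) : String := (PySem.Str.slice? s none none (-1)).getD ""

-- the literal list ['horizontal', 'vertical', 'none']
def pyFlips : List String := ["horizontal", "vertical", "none"]

-- ===== PORT A =====
-- _get_tile_borders
def getTileBorders (tile : List (List String)) : List String :=
  let top := PySem.Str.join "" ((PySem.List.pyGetD tile 0 []).map (fun pixel => pixel))
  let bottom := PySem.Str.join "" ((PySem.List.pyGetD tile (PySem.List.len tile - 1) []).map (fun pixel => pixel))
  let left := PySem.Str.join "" ((PySem.List.pyRange 0 (PySem.List.len tile) 1).map (fun row => PySem.List.pyGetD (PySem.List.pyGetD tile row []) 0 ""))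
  let right := PySem.Str.join "" ((PySem.List.pyRange 0 (PySem.List.len tile) 1).map (fun row => PySem.List.pyGetD (PySem.List.pyGetD tile row []) (PySem.List.len tile - 1) ""))
  [top, right, bottom, left]

-- _rotate_borders
def rotateBorders (borders : List String) (times : Int) : List String :=
  if times = 0 then borders
  else PySem.List.slice borders (some (-times)) none ++ PySem.List.slice borders none (some (-times))

-- _flip_borders ([top, right, bottom, left] = borders always matches: borders has 4 elements; the
-- wildcard branch only makes the match total and is never reached from the ports)
def flipBorders (borders : List String) (orientation : String) : List String :=
  match borders with
  | [top, right, bottom, left] =>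
    if orientation = "horizontal" then [pyRevStr top, left, pyRevStr bottom, right]
    else if orientation = "vertical" then [bottom, pyRevStr right, top, pyRevStr left]
    else borders
  | _ => borders

def flip_two_tiles_py (tile_one : List (List String)) (tile_two : List (List String)) : Option (Int × String × Int × String) :=
  let tile_one_borders := getTileBorders tile_one
  let tile_two_borders := getTileBorders tile_two
  (PySem.List.pyRange 0 4 1).findSome? (fun rotation_1 =>
    let rotated_tile_one_borders := rotateBorders tile_one_borders rotation_1
    pyFlips.findSome? (fun flip_1 =>
      let flipped_tile_one_borders := flipBorders rotated_tile_one_borders flip_1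
      (PySem.List.pyRange 0 4 1).findSome? (fun rotation_2 =>
        let rotated_tile_two_borders := rotateBorders tile_two_borders rotation_2
        pyFlips.findSome? (fun flip_2 =>
          let flipped_tile_two_borders := flipBorders rotated_tile_two_borders flip_2
          if PySem.List.pyGetD flipped_tile_one_borders 1 "" = PySem.List.pyGetD flipped_tile_two_borders 3 "" then
            some (rotation_1, flip_1, rotation_2, flip_2)
          else none))))

-- ===== PORT B =====
-- _borders
def bordersB (tile : List (List String)) : List String :=
  let n := PySem.List.len tile
  let top := PySem.Str.join "" (PySem.List.pyGetD tile 0 [])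
  let bottom := PySem.Str.join "" (PySem.List.pyGetD tile (n - 1) [])
  let left := PySem.Str.join "" (tile.map (fun row => PySem.List.pyGetD row 0 ""))
  let right := PySem.Str.join "" (tile.map (fun row => PySem.List.pyGetD row (n - 1) ""))
  [top, right, bottom, left]

-- _left_border
def leftBorder (borders : List String) (rotation : Int) (flip : String) : String :=
  if flip = "horizontal" then PySem.List.pyGetD borders (PySem.Int.mod (1 - rotation) 4) ""
  else if flip = "vertical" then pyRevStr (PySem.List.pyGetD borders (PySem.Int.mod (3 - rotation) 4) "")
  else PySem.List.pyGetD borders (PySem.Int.mod (3 - rotation) 4) ""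

-- _right_border
def rightBorder (borders : List String) (rotation : Int) (flip : String) : String :=
  if flip = "horizontal" then PySem.List.pyGetD borders (PySem.Int.mod (3 - rotation) 4) ""
  else if flip = "vertical" then pyRevStr (PySem.List.pyGetD borders (PySem.Int.mod (1 - rotation) 4) "")
  else PySem.List.pyGetD borders (PySem.Int.mod (1 - rotation) 4) ""

def flip_two_tiles_py_alt (tile_one : List (List String)) (tile_two : List (List String)) : Option (Int × String × Int × String) :=
  let borders_one := bordersB tile_one
  let borders_two := bordersB tile_two
  let index : PySem.Dict String (Int × String) :=
    (PySem.List.pyRange 0 4 1).foldl (fun d rotation_2 =>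
      pyFlips.foldl (fun d flip_2 =>
        d.setdefault (leftBorder borders_two rotation_2 flip_2) (rotation_2, flip_2)) d)
      PySem.Dict.empty
  (PySem.List.pyRange 0 4 1).findSome? (fun rotation_1 =>
    pyFlips.findSome? (fun flip_1 =>
      match index.get? (rightBorder borders_one rotation_1 flip_1) with
      | some hit => some (rotation_1, flip_1, hit.1, hit.2)
      | none => none))

-- ===== PRECONDITION & SPEC =====
-- Pre_ excludes exactly the inputs on which the Python A raises an IndexError: an empty tile,
-- or a row shorter than the number of rows (A indexes column len(tile)-1 of every row).
def Pre_flip_two_tiles_py (tile_one : List (List String)) (tile_two : List (List String)) : Prop :=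
  tile_one ≠ [] ∧ (∀ row ∈ tile_one, tile_one.length ≤ row.length) ∧
  tile_two ≠ [] ∧ (∀ row ∈ tile_two, tile_two.length ≤ row.length)
instance (tile_one : List (List String)) (tile_two : List (List String)) : Decidable (Pre_flip_two_tiles_py tile_one tile_two) := by unfold Pre_flip_two_tiles_py; infer_instance

def pvWitness_flip_two_tiles_py : List (List String) × List (List String) := ([["a"]], [["b"]])

def Spec_flip_two_tiles_py (tile_one : List (List String)) (tile_two : List (List String)) (out : Option (Int × String × Int × String)) : Prop := out = flip_two_tiles_py_alt tile_one tile_two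
instance (tile_one : List (List String)) (tile_two : List (List String)) (out : Option (Int × String × Int × String)) : Decidable (Spec_flip_two_tiles_py tile_one tile_two out) := by unfold Spec_flip_two_tiles_py; infer_instance

-- ===== CLAIM (what is proved, stated in full; the proofs are below) =====
def Claim_equal_flip_two_tiles_py : Prop := ∀ (tile_one : List (List String)) (tile_two : List (List String)), Dom_flip_two_tiles_py tile_one tile_two → Pre_flip_two_tiles_py tile_one tile_two → Spec_flip_two_tiles_py tile_one tile_two (flip_two_tiles_py tile_one tile_two)

-- ===== LEMMAS AND PROOFS =====

theorem findSome?_cons_or {α β : Type} (f : α → Option β) (a : α) (l : List α) :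
    List.findSome? f (a :: l) = (f a).or (List.findSome? f l) := by
  cases h : f a <;> simp [h]

theorem findSome?_congr_mem {α β : Type} {f g : α → Option β} {l : List α}
    (h : ∀ a ∈ l, f a = g a) : l.findSome? f = l.findSome? g := by
  induction l with
  | nil => rfl
  | cons a l ih =>
    rw [findSome?_cons_or, findSome?_cons_or, h a (by simp),
      ih (fun a ha => h a (by simp [ha]))]

theorem findSome?_map_opt {α β γ : Type} (l : List α) (p : α → Option β) (g : β → γ) :
    l.findSome? (fun x => (p x).map g) = (l.findSome? p).map g := by
  induction l with
  | nil => rfl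
  | cons a l ih => cases h : p a <;> simp [h, ih]

-- one pass of B's index-building loop: lookup afterwards = lookup before, else first scan hit
theorem get?_foldl_setdefault {α V : Type} (ps : List α) (key : α → String) (val : α → V)
    (d : PySem.Dict String V) (k : String) :
    (ps.foldl (fun d p => d.setdefault (key p) (val p)) d).get? k
      = (d.get? k).or (ps.findSome? (fun p => if key p = k then some (val p) else none)) := by
  induction ps generalizing d with
  | nil => simp
  | cons p ps ih =>
    rw [List.foldl_cons, ih, findSome?_cons_or]
    by_cases hk : key p = k
    · subst hk
      rw [PySem.Dict.get?_setdefault_self]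
      cases d.get? (key p) <;> simp
    · rw [PySem.Dict.get?_setdefault_of_ne _ _ (Ne.symm hk)]
      simp [hk]

-- B's whole nested index-building loop, as a nested first-hit scan
theorem get?_index_nested {V : Type} (rs : List Int) (fs : List String)
    (key : Int → String → String) (val : Int → String → V)
    (d : PySem.Dict String V) (k : String) :
    (rs.foldl (fun d r => fs.foldl (fun d f => d.setdefault (key r f) (val r f)) d) d).get? k
      = (d.get? k).or (rs.findSome? (fun r =>
          fs.findSome? (fun f => if key r f = k then some (val r f) else none))) := by
  induction rs generalizing d with
  | nil => simp
  | cons r rs ih =>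
    rw [List.foldl_cons, ih, get?_foldl_setdefault, findSome?_cons_or, Option.or_assoc]

-- on the four-element border lists the ports build, index 3 of flip(rotate(·)) is B's leftBorder …
set_option maxHeartbeats 2000000 in
theorem left_border_eq (t r b l : String) (r2 : Int) (hr : r2 ∈ ([0, 1, 2, 3] : List Int))
    (f2 : String) (hf : f2 ∈ pyFlips) :
    PySem.List.pyGetD (flipBorders (rotateBorders [t, r, b, l] r2) f2) 3 ""
      = leftBorder [t, r, b, l] r2 f2 := by
  simp only [pyFlips, List.mem_cons, List.not_mem_nil, or_false] at hr hf
  rcases hr with h | h | h | h <;> subst h <;> rcases hf with h | h | h <;> subst h <;> rfl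

-- … and index 1 is B's rightBorder
set_option maxHeartbeats 2000000 in
theorem right_border_eq (t r b l : String) (r1 : Int) (hr : r1 ∈ ([0, 1, 2, 3] : List Int))
    (f1 : String) (hf : f1 ∈ pyFlips) :
    PySem.List.pyGetD (flipBorders (rotateBorders [t, r, b, l] r1) f1) 1 ""
      = rightBorder [t, r, b, l] r1 f1 := by
  simp only [pyFlips, List.mem_cons, List.not_mem_nil, or_false] at hr hf
  rcases hr with h | h | h | h <;> subst h <;> rcases hf with h | h | h <;> subst h <;> rfl

-- B's border helper builds exactly A's border list
theorem bordersB_eq (tile : List (List String)) : bordersB tile = getTileBorders tile := by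
  have hcol : ∀ c : Int,
      (PySem.List.pyRange 0 (PySem.List.len tile) 1).map
          (fun i => PySem.List.pyGetD (PySem.List.pyGetD tile i []) c "")
        = tile.map (fun row => PySem.List.pyGetD row c "") := by
    intro c
    have h := congrArg (List.map (fun row => PySem.List.pyGetD row c ""))
      (PySem.List.map_pyGetD_pyRange_zero tile ([] : List String))
    simpa [List.map_map, Function.comp] using h
  simp only [bordersB, getTileBorders, List.map_id', hcol]

theorem pyRange04 : PySem.List.pyRange 0 4 1 = ([0, 1, 2, 3] : List Int) := by decide

-- the two ports agree everywhere (Pre_ is only about where the Python A raises)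
set_option maxHeartbeats 2000000 in
theorem ports_agree (tile_one tile_two : List (List String)) :
    flip_two_tiles_py tile_one tile_two = flip_two_tiles_py_alt tile_one tile_two := by
  unfold flip_two_tiles_py flip_two_tiles_py_alt
  rw [bordersB_eq, bordersB_eq]
  obtain ⟨t1, r1, b1, l1, hb1⟩ : ∃ t r b l, getTileBorders tile_one = [t, r, b, l] :=
    ⟨_, _, _, _, rfl⟩
  obtain ⟨t2, r2, b2, l2, hb2⟩ : ∃ t r b l, getTileBorders tile_two = [t, r, b, l] :=
    ⟨_, _, _, _, rfl⟩
  rw [hb1, hb2, pyRange04]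
  apply findSome?_congr_mem
  intro rot1 hrot1
  apply findSome?_congr_mem
  intro fl1 hfl1
  simp only []
  rw [get?_index_nested, PySem.Dict.get?_empty, Option.none_or,
    right_border_eq t1 r1 b1 l1 rot1 hrot1 fl1 hfl1]
  have hA : (([0, 1, 2, 3] : List Int).findSome? (fun rot2 =>
      pyFlips.findSome? (fun fl2 =>
        if rightBorder [t1, r1, b1, l1] rot1 fl1
            = PySem.List.pyGetD (flipBorders (rotateBorders [t2, r2, b2, l2] rot2) fl2) 3 ""
        then some (rot1, fl1, rot2, fl2) else none)))
      = (([0, 1, 2, 3] : List Int).findSome? (fun rot2 =>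
      pyFlips.findSome? (fun fl2 =>
        if leftBorder [t2, r2, b2, l2] rot2 fl2
            = rightBorder [t1, r1, b1, l1] rot1 fl1 then some (rot2, fl2) else none))).map
        (fun hit => (rot1, fl1, hit.1, hit.2)) := by
    rw [← findSome?_map_opt]
    apply findSome?_congr_mem
    intro rot2 hrot2
    rw [← findSome?_map_opt]
    apply findSome?_congr_mem
    intro fl2 hfl2
    rw [left_border_eq t2 r2 b2 l2 rot2 hrot2 fl2 hfl2]
    by_cases h : leftBorder [t2, r2, b2, l2] rot2 fl2 = rightBorder [t1, r1, b1, l1] rot1 fl1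
    · simp [h]
    · simp [h, Ne.symm h]
  rw [hA]
  generalize (([0, 1, 2, 3] : List Int).findSome? (fun rot2 =>
      pyFlips.findSome? (fun fl2 =>
        if leftBorder [t2, r2, b2, l2] rot2 fl2
            = rightBorder [t1, r1, b1, l1] rot1 fl1 then some (rot2, fl2) else none))) = o
  cases o <;> rfl

-- ===== VERDICT (by name: the statement is the Claim_ definition above) =====
theorem flip_two_tiles_py_spec : Claim_equal_flip_two_tiles_py := by
  intro tile_one tile_two _ _
  unfold Spec_flip_two_tiles_py
  exact ports_agree tile_one tile_two
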